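-- pv_equiv track=rewrite | github.com/huytq000605/CF-CP | Coding Practice with Kick Start Session #1 - Kick Start 2022/H-Index.py | solve
-- ===== SOURCE A (Python) =====
-- from collections import Counter
--
-- def solve(papers, n):
-- 	counter = Counter()
-- 	level = 0
-- 	current = 0
-- 	result = []
-- 	for paper in papers:
-- 		if paper > level:
-- 			current += 1
-- 			counter[paper] += 1
-- 			if current > level:
-- 				level += 1
-- 				current -= counter[level]
-- 		result.append(level)
-- 	return " ".join(map(str, result))
-- ===== SOURCE B (Python) =====
-- def solve(papers, n):
-- 	result = []
-- 	pref = []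
-- 	for paper in papers:
-- 		pref.append(paper)
-- 		h = 0
-- 		while sum(1 for p in pref if p >= h + 1) >= h + 1:
-- 			h += 1
-- 		result.append(h)
-- 	return " ".join(map(str, result))
-- ===== Notes on version B (the rewrite author's own statement) =====
-- stated objective: simpler
-- what changed: B drops A's incremental level/current/Counter bookkeeping and instead recomputes the h-index of each prefix from its definition (grow h while at least h+1 prefix papers have at least h+1 citations).
import Mathlib
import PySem

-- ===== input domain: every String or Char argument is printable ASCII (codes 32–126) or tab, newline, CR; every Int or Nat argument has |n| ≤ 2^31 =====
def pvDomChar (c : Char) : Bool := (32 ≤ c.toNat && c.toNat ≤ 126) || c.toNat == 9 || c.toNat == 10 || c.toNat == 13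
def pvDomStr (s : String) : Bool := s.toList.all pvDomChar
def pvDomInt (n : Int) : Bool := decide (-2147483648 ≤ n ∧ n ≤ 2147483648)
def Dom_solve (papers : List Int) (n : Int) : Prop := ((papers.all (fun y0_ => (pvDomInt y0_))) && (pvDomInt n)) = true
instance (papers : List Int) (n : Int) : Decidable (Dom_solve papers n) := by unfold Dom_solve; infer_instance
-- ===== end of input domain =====

-- B replaces A's incremental level/current/Counter bookkeeping by recomputing each prefix's
-- h-index from its definition; objective: simpler (same return value, not faster).

-- ===== PORT A =====
-- state: (counter, level, current, result)
def solveStep (st : PySem.Dict Int Int × Int × Int × List Int) (paper : Int) :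
    PySem.Dict Int Int × Int × Int × List Int :=
  let counter := st.1
  let level := st.2.1
  let current := st.2.2.1
  let result := st.2.2.2
  if level < paper then
    let current := current + 1
    let counter := counter.modify paper 0 (· + 1)
    if level < current then
      let level := level + 1
      let current := current - counter.getD level 0
      (counter, level, current, result ++ [level])
    else
      (counter, level, current, result ++ [level])
  else
    (counter, level, current, result ++ [level])

def solve (papers : List Int) (n : Int) : String :=
  PySem.Str.join " "
    (((papers.foldl solveStep (PySem.Dict.empty, 0, 0, [])).2.2.2).map PySem.Int.toStr)

-- ===== PORT B =====
-- while sum(1 for p in pref if p >= h + 1) >= h + 1: h += 1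
def hLoop (pref : List Int) (h : Nat) : Nat :=
  if h + 1 ≤ pref.countP (fun p => decide ((h : Int) + 1 ≤ p)) then hLoop pref (h + 1) else h
termination_by pref.length + 1 - h
decreasing_by
  have hc := List.countP_le_length (l := pref) (p := fun p => decide ((h : Int) + 1 ≤ p))
  omega

-- state: (pref, result)
def altStep (st : List Int × List Int) (paper : Int) : List Int × List Int :=
  let pref := st.1 ++ [paper]
  (pref, st.2 ++ [(hLoop pref 0 : Int)])

def solve_alt (papers : List Int) (n : Int) : String :=
  PySem.Str.join " " (((papers.foldl altStep ([], [])).2).map PySem.Int.toStr)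

-- ===== PRECONDITION & SPEC =====
def Spec_solve (papers : List Int) (n : Int) (out : String) : Prop := out = solve_alt papers n
instance (papers : List Int) (n : Int) (out : String) : Decidable (Spec_solve papers n out) := by unfold Spec_solve; infer_instance

-- ===== CLAIM (what is proved, stated in full; the proofs are below) =====
def Claim_equal_solve : Prop := ∀ (papers : List Int) (n : Int), Dom_solve papers n → Spec_solve papers n (solve papers n)

-- ===== LEMMAS AND PROOFS =====

-- number of papers with citation count ≥ t, as an Int
def cgeI (l : List Int) (t : Int) : Int := (l.countP (fun p => decide (t ≤ p)) : Int)

lemma cgeI_nonneg (l : List Int) (t : Int) : 0 ≤ cgeI l t := by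
  simp [cgeI]

lemma cgeI_anti (l : List Int) {t t' : Int} (h : t ≤ t') : cgeI l t' ≤ cgeI l t := by
  unfold cgeI
  have := List.countP_mono_left (l := l)
    (p := fun p => decide (t' ≤ p)) (q := fun p => decide (t ≤ p))
    (fun a _ ha => by simp at ha ⊢; omega)
  exact_mod_cast this

lemma cgeI_append (l : List Int) (x t : Int) :
    cgeI (l ++ [x]) t = cgeI l t + (if t ≤ x then 1 else 0) := by
  unfold cgeI
  by_cases h : t ≤ x <;> simp [List.countP_append, h]

lemma cgeI_succ (l : List Int) (t : Int) :
    cgeI l t = cgeI l (t + 1) + (l.count t : Int) := by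
  unfold cgeI
  induction l with
  | nil => simp
  | cons a l ih =>
    rw [List.countP_cons, List.countP_cons, List.count_cons]
    push_cast
    split_ifs <;> simp_all <;> omega

lemma count_append_singleton (l : List Int) (x v : Int) :
    (l ++ [x]).count v = l.count v + (if x = v then 1 else 0) := by
  by_cases h : x = v <;> simp [List.count_append, h]

-- the invariant carried by A's loop state on prefix `pref`
def LoopInv (pref : List Int) (counter : PySem.Dict Int Int) (level current : Int) : Prop :=
  0 ≤ level ∧ current = cgeI pref (level + 1) ∧
  level ≤ cgeI pref level ∧ cgeI pref (level + 1) ≤ level ∧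
  (∀ v : Int, level < v → counter.getD v 0 = (pref.count v : Int))

-- the h-index (largest h with ≥ h papers ≥ h) is unique
lemma level_unique (l : List Int) {L M : Int}
    (hL1 : L ≤ cgeI l L) (hL2 : cgeI l (L + 1) ≤ L)
    (hM1 : M ≤ cgeI l M) (hM2 : cgeI l (M + 1) ≤ M) : L = M := by
  rcases lt_trichotomy L M with h | h | h
  · have := cgeI_anti l (t := L + 1) (t' := M) (by omega)
    omega
  · exact h
  · have := cgeI_anti l (t := M + 1) (t' := L) (by omega)
    omega

lemma hLoop_inv : ∀ (n : Nat) (pref : List Int) (h : Nat), pref.length + 1 - h ≤ n →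
    ((h : Int) ≤ cgeI pref h) →
    ((hLoop pref h : Int) ≤ cgeI pref (hLoop pref h) ∧
     cgeI pref ((hLoop pref h : Int) + 1) ≤ (hLoop pref h : Int)) := by
  intro n
  induction n with
  | zero =>
    intro pref h hn hge
    rw [hLoop]
    have hc := List.countP_le_length (l := pref) (p := fun p => decide ((h : Int) + 1 ≤ p))
    have hcond : ¬ (h + 1 ≤ pref.countP (fun p => decide ((h : Int) + 1 ≤ p))) := by omega
    simp only [hcond, if_false]
    constructor
    · exact hge
    · unfold cgeI
      omega
  | succ n ih =>
    intro pref h hn hge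
    rw [hLoop]
    by_cases hcond : h + 1 ≤ pref.countP (fun p => decide ((h : Int) + 1 ≤ p))
    · simp only [hcond, if_true]
      have hlen := List.countP_le_length (l := pref) (p := fun p => decide ((h : Int) + 1 ≤ p))
      have := ih pref (h + 1) (by omega) (by unfold cgeI; push_cast; omega)
      simpa using this
    · simp only [hcond, if_false]
      constructor
      · exact hge
      · unfold cgeI
        omega

lemma level_eq_hLoop (pref : List Int) (counter : PySem.Dict Int Int) (level current : Int)
    (h : LoopInv pref counter level current) : level = (hLoop pref 0 : Int) := by
  obtain ⟨h0, _, h1, h2, _⟩ := h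
  have hr := hLoop_inv (pref.length + 1) pref 0 (by omega)
    (by simpa using cgeI_nonneg pref 0)
  exact level_unique pref h1 h2 hr.1 (by simpa using hr.2)

lemma loopinv_step (pref : List Int) (counter : PySem.Dict Int Int) (level current x : Int)
    (h : LoopInv pref counter level current) (res : List Int) :
    LoopInv (pref ++ [x]) (solveStep (counter, level, current, res) x).1
      (solveStep (counter, level, current, res) x).2.1
      (solveStep (counter, level, current, res) x).2.2.1 := by
  obtain ⟨h0, hcur, hge, hlt, hcnt⟩ := h
  by_cases hx : level < x
  · -- the new counter agrees with the multiset of the new prefix above `level`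
    have hcnt1 : ∀ v : Int, level < v →
        (counter.modify x 0 (· + 1)).getD v 0 = ((pref ++ [x]).count v : Int) := by
      intro v hv
      rw [PySem.Dict.getD_modify, count_append_singleton]
      by_cases hvx : v = x
      · rw [if_pos hvx, hvx, hcnt x (hvx ▸ hv), if_pos rfl]
        push_cast
        ring
      · rw [if_neg hvx, hcnt v hv, if_neg (fun h => hvx h.symm)]
        push_cast
        ring
    have hc1 : cgeI (pref ++ [x]) (level + 1) = current + 1 := by
      rw [cgeI_append, hcur]
      simp [show level + 1 ≤ x by omega]
    by_cases hcu : level < current + 1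
    · simp only [solveStep, hx, if_true, hcu, if_true]
      refine ⟨by omega, ?_, ?_, ?_, ?_⟩
      · -- current + 1 - count(level+1) = cgeI pref' (level+1+1)
        rw [hcnt1 (level + 1) (by omega)]
        have hs := cgeI_succ (pref ++ [x]) (level + 1)
        omega
      · omega
      · have hb := cgeI_anti pref (t := level + 1) (t' := level + 1 + 1) (by omega)
        have hc := cgeI_append pref x (level + 1 + 1)
        split_ifs at hc <;> omega
      · intro v hv
        exact hcnt1 v (by omega)
    · simp only [solveStep, hx, if_true, hcu, if_false]
      exact ⟨h0, hc1.symm, by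
        have := cgeI_append pref x level
        split_ifs at this <;> omega, by omega, hcnt1⟩
  · simp only [solveStep, hx, if_false]
    have hxl : ¬ (level + 1 ≤ x) := by omega
    refine ⟨h0, ?_, ?_, ?_, ?_⟩
    · rw [cgeI_append]; simp [hxl, hcur]
    · have := cgeI_append pref x level
      split_ifs at this <;> omega
    · rw [cgeI_append]; simp [hxl]; omega
    · intro v hv
      rw [hcnt v hv, count_append_singleton]
      simp [show x ≠ v by omega]

lemma fold_eq : ∀ (papers pref res : List Int) (counter : PySem.Dict Int Int)
    (level current : Int), LoopInv pref counter level current →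
    (papers.foldl solveStep (counter, level, current, res)).2.2.2 =
      (papers.foldl altStep (pref, res)).2 := by
  intro papers
  induction papers with
  | nil => intro pref res counter level current _; rfl
  | cons x papers ih =>
    intro pref res counter level current hinv
    simp only [List.foldl_cons]
    have hstep := loopinv_step pref counter level current x hinv res
    have hres : (solveStep (counter, level, current, res) x).2.2.2 =
        res ++ [(solveStep (counter, level, current, res) x).2.1] := by
      simp only [solveStep]
      split_ifs <;> rfl
    have hlev := level_eq_hLoop (pref ++ [x]) _ _ _ hstep
    have hkey : (solveStep (counter, level, current, res) x) =
        ((solveStep (counter, level, current, res) x).1,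
         (solveStep (counter, level, current, res) x).2.1,
         (solveStep (counter, level, current, res) x).2.2.1,
         res ++ [(hLoop (pref ++ [x]) 0 : Int)]) := by
      rw [← hlev, ← hres]
    rw [hkey]
    have halt : altStep (pref, res) x = (pref ++ [x], res ++ [(hLoop (pref ++ [x]) 0 : Int)]) := rfl
    rw [halt]
    exact ih (pref ++ [x]) (res ++ [(hLoop (pref ++ [x]) 0 : Int)]) _ _ _ hstep

lemma loopinv_init : LoopInv [] PySem.Dict.empty 0 0 := by
  refine ⟨le_rfl, ?_, ?_, ?_, ?_⟩ <;> simp [cgeI, PySem.Dict.getD_empty]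

-- ===== VERDICT (by name: the statement is the Claim_ definition above) =====
theorem solve_spec : Claim_equal_solve := by
  intro papers n _
  unfold Spec_solve solve solve_alt
  rw [fold_eq papers [] [] PySem.Dict.empty 0 0 loopinv_init]
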